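-- pv_equiv track=rewrite | github.com/blceditor/otyokwah | scripts/convert-to-keystatic-format.py | convert_frontmatter
-- ===== SOURCE A (Python) =====
-- def convert_frontmatter(content: str, template: str) -> str:
--     """Convert template field to templateFields format"""
--     lines = content.split('\n')
--     output_lines = []
--     in_frontmatter = False
--     frontmatter_ended = False
--
--     for line in lines:
--         if line.strip() == '---':
--             if not in_frontmatter:
--                 in_frontmatter = True
--                 output_lines.append(line)
--             else:
--                 # End of frontmatter - add templateFields before closing
--                 output_lines.append(f'templateFields:')
--                 output_lines.append(f'  discriminant: {template}')
--                 output_lines.append(line)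
--                 frontmatter_ended = True
--                 in_frontmatter = False
--             continue
--
--         if in_frontmatter:
--             # Skip lines that are template-specific fields we'll move later
--             if line.startswith('template:'):
--                 continue
--             # Keep other frontmatter fields
--             output_lines.append(line)
--         else:
--             output_lines.append(line)
--
--     return '\n'.join(output_lines)
-- ===== SOURCE B (Python) =====
-- def convert_frontmatter(content: str, template: str) -> str:
--     """Convert template field to templateFields format"""
--     lines = content.split('\n')
--     is_marker = [ln.strip() == '---' for ln in lines]
--     prefix = [0]
--     for m in is_marker:
--         prefix.append(prefix[-1] + m)
--     pieces = []
--     for line, mk, cnt in zip(lines, is_marker, prefix):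
--         if mk:
--             if cnt % 2 == 1:
--                 pieces.append(['templateFields:', f'  discriminant: {template}', line])
--             else:
--                 pieces.append([line])
--         elif cnt % 2 == 1 and line.startswith('template:'):
--             pieces.append([])
--         else:
--             pieces.append([line])
--     return '\n'.join(x for p in pieces for x in p)
-- ===== Notes on version B (the rewrite author's own statement) =====
-- stated objective: alternative
-- what changed: Replaces A's single stateful pass with a toggling in_frontmatter flag by precomputing marker flags and prefix marker counts, then mapping each line independently to its output piece by the parity of the markers before it (and drops the dead frontmatter_ended variable).
import Mathlib
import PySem

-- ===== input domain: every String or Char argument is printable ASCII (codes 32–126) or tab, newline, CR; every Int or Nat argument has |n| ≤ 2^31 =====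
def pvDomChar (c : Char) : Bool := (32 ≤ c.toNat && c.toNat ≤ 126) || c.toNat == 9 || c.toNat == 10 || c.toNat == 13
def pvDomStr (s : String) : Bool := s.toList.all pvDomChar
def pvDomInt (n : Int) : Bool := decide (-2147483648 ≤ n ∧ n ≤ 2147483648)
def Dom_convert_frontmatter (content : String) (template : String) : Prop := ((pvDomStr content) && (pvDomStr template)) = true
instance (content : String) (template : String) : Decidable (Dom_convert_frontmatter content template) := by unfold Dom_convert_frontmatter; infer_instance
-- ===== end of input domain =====

-- B replaces A's toggling in_frontmatter state flag by a stateless per-line pass driven by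
-- precomputed marker flags and prefix marker counts (objective: alternative decomposition).

-- ===== PORT A =====
-- A's loop body: state = (output_lines, in_frontmatter, frontmatter_ended);
-- the dead frontmatter_ended variable is carried faithfully.
def pvAStep (t : String) (st : List String × Bool × Bool) (line : String) :
    List String × Bool × Bool :=
  if PySem.Str.strip line == "---" then
    if !st.2.1 then (st.1 ++ [line], true, st.2.2)
    else (st.1 ++ ["templateFields:", "  discriminant: " ++ t, line], false, true)
  else if st.2.1 then
    if PySem.Str.startswith line "template:" then (st.1, st.2.1, st.2.2)
    else (st.1 ++ [line], st.2.1, st.2.2)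
  else (st.1 ++ [line], st.2.1, st.2.2)

-- A: one pass, a boolean in_frontmatter flag toggled on '---' lines.
def convert_frontmatter (content : String) (template : String) : String :=
  let lines := (PySem.Str.split? content "\n").getD []   -- sep "\n" ≠ "", so split? is always some
  let st := lines.foldl (pvAStep template) ([], false, false)
  PySem.Str.join "\n" st.1

-- ===== PORT B =====
-- B's prefix-count step: prefix.append(prefix[-1] + m)
def pvPreStep (p : List Nat) (m : Bool) : List Nat :=
  p ++ [PySem.List.pyGetD p (-1) 0 + (if m then 1 else 0)]

-- B's per-line piece: x = (line, is_marker flag, count of markers before the line)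
def pvPiece (t : String) (x : String × Bool × Nat) : List String :=
  if x.2.1 then
    if x.2.2 % 2 == 1 then ["templateFields:", "  discriminant: " ++ t, x.1]
    else [x.1]
  else if x.2.2 % 2 == 1 && PySem.Str.startswith x.1 "template:" then []
  else [x.1]

-- B: marker flags and prefix counts computed first, then each line mapped independently
-- to its piece, flattened.
def convert_frontmatter_alt (content : String) (template : String) : String :=
  let lines := (PySem.Str.split? content "\n").getD []   -- sep "\n" ≠ "", so split? is always some
  let isMarker := lines.map (fun ln => PySem.Str.strip ln == "---")
  let pre := isMarker.foldl pvPreStep [0]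
  let pieces := (lines.zip (isMarker.zip pre)).map (pvPiece template)
  PySem.Str.join "\n" pieces.flatten

-- ===== PRECONDITION & SPEC =====
def Spec_convert_frontmatter (content : String) (template : String) (out : String) : Prop := out = convert_frontmatter_alt content template
instance (content : String) (template : String) (out : String) : Decidable (Spec_convert_frontmatter content template out) := by unfold Spec_convert_frontmatter; infer_instance

-- ===== CLAIM (what is proved, stated in full; the proofs are below) =====
def Claim_equal_convert_frontmatter : Prop := ∀ (content : String) (template : String), Dom_convert_frontmatter content template → Spec_convert_frontmatter content template (convert_frontmatter content template)

-- ===== LEMMAS AND PROOFS =====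

-- the common per-line recursion both sides reduce to: c = number of marker lines before
def pvGo (t : String) (c : Nat) : List String → List String
  | [] => []
  | l :: ls =>
    pvPiece t (l, PySem.Str.strip l == "---", c)
    ++ pvGo t (c + (if PySem.Str.strip l == "---" then 1 else 0)) ls

-- running marker counts after each line
def pvScan (c : Nat) : List Bool → List Nat
  | [] => []
  | m :: ms => (c + if m then 1 else 0) :: pvScan (c + if m then 1 else 0) ms

theorem pvPreFold (ms : List Bool) : ∀ (p : List Nat) (c : Nat),
    ms.foldl pvPreStep (p ++ [c]) = p ++ [c] ++ pvScan c ms := by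
  induction ms with
  | nil => intro p c; simp [pvScan]
  | cons m ms ih =>
    intro p c
    rw [List.foldl_cons,
        show pvPreStep (p ++ [c]) m = (p ++ [c]) ++ [c + if m then 1 else 0] from by
          simp [pvPreStep, PySem.List.pyGetD_neg_one_append_singleton],
        ih (p ++ [c]) (c + if m then 1 else 0)]
    simp [pvScan]

theorem pvBsideEq (t : String) (lines : List String) : ∀ (c : Nat),
    ((lines.zip ((lines.map (fun ln => PySem.Str.strip ln == "---")).zip
        (c :: pvScan c (lines.map (fun ln => PySem.Str.strip ln == "---"))))).map
      (pvPiece t)).flatten = pvGo t c lines := by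
  induction lines with
  | nil => intro c; simp [pvGo]
  | cons l ls ih =>
    intro c
    simp only [List.map_cons, pvScan, List.zip_cons_cons, List.flatten_cons, pvGo, ih]

theorem pvAsideEq (t : String) (lines : List String) : ∀ (acc : List String) (c : Nat) (e : Bool),
    (lines.foldl (pvAStep t) (acc, c % 2 == 1, e)).1 = acc ++ pvGo t c lines := by
  induction lines with
  | nil => intro acc c e; simp [pvGo]
  | cons l ls ih =>
    intro acc c e
    rw [List.foldl_cons, pvGo]
    by_cases h : (PySem.Str.strip l == "---") = true
    · by_cases hc : c % 2 = 1
      · have h1 : (c % 2 == 1) = true := by simp [hc]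
        have h2 : ((c + 1) % 2 == 1) = false := by simp; omega
        rw [show pvAStep t (acc, c % 2 == 1, e) l
              = (acc ++ ["templateFields:", "  discriminant: " ++ t, l], ((c + 1) % 2 == 1), true)
            from by simp [pvAStep, h, h1, h2], ih]
        simp [pvPiece, h, h1]
      · have h1 : (c % 2 == 1) = false := by simp; omega
        have h2 : ((c + 1) % 2 == 1) = true := by simp; omega
        rw [show pvAStep t (acc, c % 2 == 1, e) l = (acc ++ [l], ((c + 1) % 2 == 1), e)
            from by simp [pvAStep, h, h1, h2], ih]
        simp [pvPiece, h, h1]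
    · have h' : (PySem.Str.strip l == "---") = false := by simpa using h
      rw [show pvAStep t (acc, c % 2 == 1, e) l
            = (acc ++ (if (c % 2 == 1) && PySem.Str.startswith l "template:" then [] else [l]),
                (c % 2 == 1), e)
          from by
            by_cases h1 : (c % 2 == 1) = true
            · simp only [pvAStep, h', h1, Bool.false_eq_true, if_false, if_true, Bool.true_and]
              split_ifs <;> simp
            · have h1' : (c % 2 == 1) = false := by simpa using h1
              simp [pvAStep, h', h1'],
          show (if PySem.Str.strip l == "---" then (1:Nat) else 0) = 0 from by simp [h'], ih]
      simp [pvPiece, h']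

-- ===== VERDICT (by name: the statement is the Claim_ definition above) =====
theorem convert_frontmatter_spec : Claim_equal_convert_frontmatter := by
  intro content template _
  unfold Spec_convert_frontmatter convert_frontmatter convert_frontmatter_alt
  dsimp only
  generalize (PySem.Str.split? content "\n").getD [] = lines
  have hpre := pvPreFold (lines.map (fun ln => PySem.Str.strip ln == "---")) [] 0
  simp only [List.nil_append] at hpre
  rw [hpre,
      show ([0] : List Nat) ++ pvScan 0 (lines.map (fun ln => PySem.Str.strip ln == "---"))
        = 0 :: pvScan 0 (lines.map (fun ln => PySem.Str.strip ln == "---")) from by simp,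
      pvBsideEq template lines 0,
      show (false : Bool) = ((0 : Nat) % 2 == 1) from by decide,
      pvAsideEq template lines [] 0 ((0 : Nat) % 2 == 1),
      List.nil_append]
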